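-- pv_equiv track=rewrite | github.com/StefanEvanghelides/AdventOfCode | 2015/15/py/main-b.py | compute_total_scores
-- ===== SOURCE A (Python) =====
-- def compute_total_scores(ingredients: dict[str,dict[str,int]], ingredients_quants: dict[str,int]) -> list[int]:
--   total_cap: int = 0
--   total_dur: int = 0
--   total_fla: int = 0
--   total_tex: int = 0
--   total_cal: int = 0
--
--   for key,quant in ingredients_quants.items():
--     total_cap += quant * ingredients[key]["capacity"]
--     total_dur += quant * ingredients[key]["durability"]
--     total_fla += quant * ingredients[key]["flavor"]
--     total_tex += quant * ingredients[key]["texture"]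
--     total_cal += quant * ingredients[key]["calories"]
--
--   total_cap = 0 if total_cap < 0 else total_cap
--   total_dur = 0 if total_dur < 0 else total_dur
--   total_fla = 0 if total_fla < 0 else total_fla
--   total_tex = 0 if total_tex < 0 else total_tex
--   total_cal = 0 if total_cal < 0 else total_cal
--
--   return [total_cap, total_dur, total_fla, total_tex, total_cal]
-- ===== SOURCE B (Python) =====
-- def compute_total_scores(ingredients: dict[str,dict[str,int]], ingredients_quants: dict[str,int]) -> list[int]:
--   return [max(0, sum(quant * ingredients[key][prop] for key, quant in ingredients_quants.items()))
--           for prop in ["capacity", "durability", "flavor", "texture", "calories"]]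
-- ===== Notes on version B (the rewrite author's own statement) =====
-- stated objective: simpler
-- what changed: Transposed the loops: property-major comprehension computing one clamped weighted sum per property, instead of A's single ingredient-major pass threading five accumulators.
import Mathlib
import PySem

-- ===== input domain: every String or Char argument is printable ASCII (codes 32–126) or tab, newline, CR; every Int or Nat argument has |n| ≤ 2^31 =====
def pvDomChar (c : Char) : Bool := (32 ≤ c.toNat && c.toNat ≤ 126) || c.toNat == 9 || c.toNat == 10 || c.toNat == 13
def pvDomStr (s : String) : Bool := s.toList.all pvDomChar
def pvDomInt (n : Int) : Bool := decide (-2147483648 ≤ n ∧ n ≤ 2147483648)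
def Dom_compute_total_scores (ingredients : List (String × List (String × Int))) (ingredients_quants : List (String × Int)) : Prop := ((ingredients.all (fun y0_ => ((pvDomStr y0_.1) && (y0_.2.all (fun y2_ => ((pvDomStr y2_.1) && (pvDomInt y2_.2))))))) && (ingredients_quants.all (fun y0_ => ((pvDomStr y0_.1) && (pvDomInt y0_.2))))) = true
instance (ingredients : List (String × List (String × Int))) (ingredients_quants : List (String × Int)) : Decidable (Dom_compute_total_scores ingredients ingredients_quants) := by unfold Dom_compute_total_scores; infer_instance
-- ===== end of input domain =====

-- ===== PORT A =====
-- B simplifies A by transposing the loops (property-major comprehension); same values, same cost.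
-- Dict lookups are ported with PySem.Dict.get?; a missing key (KeyError in Python) is excluded by Pre_,
-- so the `.getD` defaults below are never reached on admitted inputs.
def pvGetInt (d : List (String × Int)) (k : String) : Int :=
  ((PySem.Dict.mk d).get? k).getD 0

def pvGetIng (ingredients : List (String × List (String × Int))) (k : String) :
    List (String × Int) :=
  ((PySem.Dict.mk ingredients).get? k).getD []

def compute_total_scores (ingredients : List (String × List (String × Int)))
    (ingredients_quants : List (String × Int)) : List Int :=
  let t := ingredients_quants.foldl
    (fun (acc : Int × Int × Int × Int × Int) kq =>
      let d := pvGetIng ingredients kq.1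
      (acc.1 + kq.2 * pvGetInt d "capacity",
       acc.2.1 + kq.2 * pvGetInt d "durability",
       acc.2.2.1 + kq.2 * pvGetInt d "flavor",
       acc.2.2.2.1 + kq.2 * pvGetInt d "texture",
       acc.2.2.2.2 + kq.2 * pvGetInt d "calories"))
    (0, 0, 0, 0, 0)
  let total_cap := if t.1 < 0 then 0 else t.1
  let total_dur := if t.2.1 < 0 then 0 else t.2.1
  let total_fla := if t.2.2.1 < 0 then 0 else t.2.2.1
  let total_tex := if t.2.2.2.1 < 0 then 0 else t.2.2.2.1
  let total_cal := if t.2.2.2.2 < 0 then 0 else t.2.2.2.2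
  [total_cap, total_dur, total_fla, total_tex, total_cal]

-- ===== PORT B =====
def compute_total_scores_alt (ingredients : List (String × List (String × Int)))
    (ingredients_quants : List (String × Int)) : List Int :=
  ["capacity", "durability", "flavor", "texture", "calories"].map (fun prop =>
    max 0 (ingredients_quants.foldl
      (fun acc kq => acc + kq.2 * pvGetInt (pvGetIng ingredients kq.1) prop) 0))

-- ===== PRECONDITION & SPEC =====
-- Pre_ excludes exactly the inputs where Python A raises KeyError: a quantity key missing from
-- `ingredients`, or one of the five property keys missing from that ingredient's dict.
def Pre_compute_total_scores (ingredients : List (String × List (String × Int)))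
    (ingredients_quants : List (String × Int)) : Prop :=
  (ingredients_quants.all (fun kq =>
    match (PySem.Dict.mk ingredients).get? kq.1 with
    | some d => ["capacity", "durability", "flavor", "texture", "calories"].all
        (fun p => ((PySem.Dict.mk d).get? p).isSome)
    | none => false)) = true
instance (ingredients : List (String × List (String × Int))) (ingredients_quants : List (String × Int)) : Decidable (Pre_compute_total_scores ingredients ingredients_quants) := by unfold Pre_compute_total_scores; infer_instance

def pvWitness_compute_total_scores : (List (String × List (String × Int))) × (List (String × Int)) :=
  ([("Butter", [("capacity", 1), ("durability", -2), ("flavor", 3), ("texture", 0), ("calories", 5)])],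
   [("Butter", 4)])

def Spec_compute_total_scores (ingredients : List (String × List (String × Int))) (ingredients_quants : List (String × Int)) (out : List Int) : Prop := out = compute_total_scores_alt ingredients ingredients_quants
instance (ingredients : List (String × List (String × Int))) (ingredients_quants : List (String × Int)) (out : List Int) : Decidable (Spec_compute_total_scores ingredients ingredients_quants out) := by unfold Spec_compute_total_scores; infer_instance

-- ===== CLAIM (what is proved, stated in full; the proofs are below) =====
def Claim_equal_compute_total_scores : Prop := ∀ (ingredients : List (String × List (String × Int))) (ingredients_quants : List (String × Int)), Dom_compute_total_scores ingredients ingredients_quants → Pre_compute_total_scores ingredients ingredients_quants → Spec_compute_total_scores ingredients ingredients_quants (compute_total_scores ingredients ingredients_quants)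

-- ===== LEMMAS AND PROOFS =====
-- B's per-property weighted sum, with an explicit starting accumulator.
def pvSum (ingredients : List (String × List (String × Int)))
    (qs : List (String × Int)) (prop : String) (init : Int) : Int :=
  qs.foldl (fun acc kq => acc + kq.2 * pvGetInt (pvGetIng ingredients kq.1) prop) init

-- A's five-accumulator fold computes the five per-property sums componentwise.
theorem pvFold5_eq (ingredients : List (String × List (String × Int)))
    (qs : List (String × Int)) (a b c d e : Int) :
    qs.foldl
      (fun (acc : Int × Int × Int × Int × Int) kq =>
        let dd := pvGetIng ingredients kq.1
        (acc.1 + kq.2 * pvGetInt dd "capacity",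
         acc.2.1 + kq.2 * pvGetInt dd "durability",
         acc.2.2.1 + kq.2 * pvGetInt dd "flavor",
         acc.2.2.2.1 + kq.2 * pvGetInt dd "texture",
         acc.2.2.2.2 + kq.2 * pvGetInt dd "calories"))
      (a, b, c, d, e) =
    (pvSum ingredients qs "capacity" a, pvSum ingredients qs "durability" b,
     pvSum ingredients qs "flavor" c, pvSum ingredients qs "texture" d,
     pvSum ingredients qs "calories" e) := by
  induction qs generalizing a b c d e with
  | nil => simp [pvSum]
  | cons kq rest ih => simp [pvSum, List.foldl_cons] at ih ⊢; exact ih _ _ _ _ _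

theorem pvClamp (t : Int) : (if t < 0 then 0 else t) = max 0 t := by omega

-- ===== VERDICT (by name: the statement is the Claim_ definition above) =====
theorem compute_total_scores_spec : Claim_equal_compute_total_scores := by
  intro ingredients qs _ _
  unfold Spec_compute_total_scores compute_total_scores compute_total_scores_alt
  simp only [pvFold5_eq, List.map, pvClamp]
  rfl
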